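-- pv_equiv track=rewrite | github.com/mzffreyvazov/mit-algo-course-practice | MIT_intro_to_algorithms/lecture1/birthday.py | birthday_match_dict
-- ===== SOURCE A (Python) =====
-- def birthday_match_dict(students):
--
--   birthdays = {}
--
--   for student in students:
--     name, birthday = student
--
--     if birthday in birthdays:
--       match_name = birthdays[birthday]
--       return (match_name, name)
--
--     birthdays[birthday] = name
--
--   return None
-- ===== SOURCE B (Python) =====
-- def birthday_match_dict(students):
--   students = list(students)
--   for i in range(len(students)):
--     name_i, bday_i = students[i]
--     for j in range(i):
--       name_j, bday_j = students[j]
--       if bday_j == bday_i: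
--         return (name_j, name_i)
--   return None
-- ===== Notes on version B (the rewrite author's own statement) =====
-- stated objective: alternative
-- what changed: Replaced the hash-table single pass by a brute-force nested index scan: for each student i, scan the earlier students j < i and return the first earlier student sharing the birthday.
import Mathlib
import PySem

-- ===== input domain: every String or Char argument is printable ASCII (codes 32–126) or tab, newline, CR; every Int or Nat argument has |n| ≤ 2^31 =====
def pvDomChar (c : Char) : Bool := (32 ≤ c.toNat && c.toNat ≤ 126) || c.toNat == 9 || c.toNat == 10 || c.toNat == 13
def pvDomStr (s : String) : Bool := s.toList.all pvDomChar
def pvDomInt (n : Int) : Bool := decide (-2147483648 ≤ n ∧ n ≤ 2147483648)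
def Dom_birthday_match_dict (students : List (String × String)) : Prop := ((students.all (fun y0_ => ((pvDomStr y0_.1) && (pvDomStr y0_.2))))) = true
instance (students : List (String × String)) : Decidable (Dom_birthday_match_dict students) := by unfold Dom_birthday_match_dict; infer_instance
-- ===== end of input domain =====

-- B replaces A's hash-table single pass by a brute-force nested index scan (alternative algorithm, same return value).


-- ===== PORT A =====
-- loop 'for student in students' with the accumulating dict 'birthdays'
def pvGoA (birthdays : PySem.Dict String String) (rest : List (String × String)) : Option (String × String) :=
  match rest with
  | [] => none
  | student :: tl =>
    let name := student.1
    let birthday := student.2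
    match birthdays.get? birthday with
    | some match_name => some (match_name, name)
    | none => pvGoA (birthdays.insert birthday name) tl

def birthday_match_dict (students : List (String × String)) : Option (String × String) :=
  pvGoA PySem.Dict.empty students

-- ===== PORT B =====
-- inner loop 'for j in range(i)' over the first i students
def pvInnerB (earlier : List (String × String)) (name_i bday_i : String) : Option (String × String) :=
  match earlier with
  | [] => none
  | sj :: tl =>
    if sj.2 == bday_i then some (sj.1, name_i) else pvInnerB tl name_i bday_i

-- outer loop 'for i in range(len(students))'
def pvOuterB (students : List (String × String)) (i : Nat) : Option (String × String) :=
  if h : i < students.length then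
    let si := students[i]
    match pvInnerB (students.take i) si.1 si.2 with
    | some r => some r
    | none => pvOuterB students (i + 1)
  else none
termination_by students.length - i

def birthday_match_dict_alt (students : List (String × String)) : Option (String × String) :=
  pvOuterB students 0

-- ===== PRECONDITION & SPEC =====
def Spec_birthday_match_dict (students : List (String × String)) (out : Option (String × String)) : Prop := out = birthday_match_dict_alt students
instance (students : List (String × String)) (out : Option (String × String)) : Decidable (Spec_birthday_match_dict students out) := by unfold Spec_birthday_match_dict; infer_instance

-- ===== CLAIM (what is proved, stated in full; the proofs are below) =====
def Claim_equal_birthday_match_dict : Prop := ∀ (students : List (String × String)), Dom_birthday_match_dict students → Spec_birthday_match_dict students (birthday_match_dict students)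

-- ===== LEMMAS AND PROOFS =====

-- B's inner scan is List.find? over the earlier students
theorem pvInnerB_eq_find (p : List (String × String)) (n b : String) :
    pvInnerB p n b = (p.find? (fun s => s.2 == b)).map (fun s => (s.1, n)) := by
  induction p with
  | nil => rfl
  | cons sj tl ih =>
    simp only [pvInnerB, List.find?_cons]
    by_cases h : sj.2 == b <;> simp [h, ih]

-- main invariant: if the dict agrees with 'first occurrence in the processed prefix p',
-- then A's remaining loop equals B's outer loop started at index p.length
theorem pvGoA_eq_pvOuterB (rest : List (String × String)) :
    ∀ (p : List (String × String)) (d : PySem.Dict String String),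
      (∀ b, d.get? b = (p.find? (fun s => s.2 == b)).map Prod.fst) →
      pvGoA d rest = pvOuterB (p ++ rest) p.length := by
  induction rest with
  | nil =>
    intro p d _
    rw [pvOuterB]
    simp [pvGoA]
  | cons st tl ih =>
    intro p d hd
    rw [pvOuterB]
    have hlen : p.length < (p ++ st :: tl).length := by simp
    have hget : (p ++ st :: tl)[p.length]'hlen = st := by
      simp [List.getElem_append_right]
    have htake : (p ++ st :: tl).take p.length = p := by
      simp
    simp only [hlen, dif_pos, hget, htake, pvInnerB_eq_find]
    rw [pvGoA]
    rw [hd st.2]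
    cases hfind : p.find? (fun s => s.2 == st.2) with
    | some s => simp
    | none =>
      simp only [Option.map_none]
      have hrec : pvGoA (d.insert st.2 st.1) tl
          = pvOuterB ((p ++ [st]) ++ tl) (p ++ [st]).length := by
        apply ih
        intro b
        by_cases hb : b = st.2
        · subst hb
          rw [PySem.Dict.get?_insert_self]
          simp [List.find?_append, hfind]
        · rw [PySem.Dict.get?_insert_of_ne _ _ hb, hd b]
          rw [List.find?_append]
          cases hpb : p.find? (fun s => s.2 == b) with
          | some s => simp
          | none =>
            have hne : ((st.2 == b) = false) := by
              simp [Ne.symm hb]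
            simp [List.find?, hne]
      rw [hrec]
      simp only [List.append_assoc, List.cons_append, List.nil_append,
        List.length_append, List.length_cons, List.length_nil]

-- ===== VERDICT (by name: the statement is the Claim_ definition above) =====
theorem birthday_match_dict_spec : Claim_equal_birthday_match_dict := by
  intro students _
  unfold Spec_birthday_match_dict birthday_match_dict birthday_match_dict_alt
  have := pvGoA_eq_pvOuterB students [] PySem.Dict.empty (by intro b; simp)
  simpa using this
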